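-- pv_equiv track=rewrite | github.com/biku34/ISEA-Team-QUAD | problem statement 1/PS1 main/usn_parser.py | _parse_reason_flags
-- ===== SOURCE A (Python) =====
-- from typing import Dict, List, Optional, Tuple
--
-- def _parse_reason_flags(reason: int) -> List[str]:
--     """Parse USN reason flags into human-readable names"""
--     reasons = []
--
--     # Reason flags mapping
--     reason_map = {
--         0x00000001: "DATA_OVERWRITE",
--         0x00000002: "DATA_EXTEND",
--         0x00000004: "DATA_TRUNCATION",
--         0x00000008: "DATA_WRITE",
--         0x00000010: "FILE_CREATE",
--         0x00000020: "FILE_DELETE",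
--         0x00000040: "EA_CHANGE",
--         0x00000080: "SECURITY_CHANGE",
--         0x00000100: "RENAME_OLD_NAME",
--         0x00000200: "RENAME_NEW_NAME",
--         0x00000400: "INDEXABLE_CHANGE",
--         0x00000800: "BASIC_INFO_CHANGE",
--         0x00001000: "HARD_LINK_CHANGE",
--         0x00002000: "COMPRESSION_CHANGE",
--         0x00004000: "ENCRYPTION_CHANGE",
--         0x00008000: "OBJECT_ID_CHANGE",
--         0x00010000: "REPARSE_POINT_CHANGE",
--         0x00020000: "STREAM_CHANGE",
--         0x00040000: "CLOSE"
--     }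
--
--     for flag, name in reason_map.items():
--         if reason & flag:
--             reasons.append(name)
--
--     return reasons
-- ===== SOURCE B (Python) =====
-- # Divide-and-conquer over the bit range: mask to the known flag bits, then
-- # recursively split the range in halves, skipping zero sub-masks entirely,
-- # instead of a linear scan over the fixed flag map.
-- _USN_REASON_NAMES = [
--     "DATA_OVERWRITE",
--     "DATA_EXTEND",
--     "DATA_TRUNCATION",
--     "DATA_WRITE",
--     "FILE_CREATE",
--     "FILE_DELETE",
--     "EA_CHANGE",
--     "SECURITY_CHANGE",
--     "RENAME_OLD_NAME",
--     "RENAME_NEW_NAME",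
--     "INDEXABLE_CHANGE",
--     "BASIC_INFO_CHANGE",
--     "HARD_LINK_CHANGE",
--     "COMPRESSION_CHANGE",
--     "ENCRYPTION_CHANGE",
--     "OBJECT_ID_CHANGE",
--     "REPARSE_POINT_CHANGE",
--     "STREAM_CHANGE",
--     "CLOSE",
-- ]
--
--
-- def _parse_reason_flags(reason: int):
--     """Parse USN reason flags into human-readable names"""
--     def go(m, lo, width):
--         # names of the set bits of m (0 <= m < 2**width), offset by lo
--         if m == 0:
--             return []
--         if width <= 1:
--             return [_USN_REASON_NAMES[lo]]
--         half = width // 2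
--         return go(m & ((1 << half) - 1), lo, half) + go(m >> half, lo + half, width - half)
--
--     return go(reason & 0x7FFFF, 0, 19)
-- ===== Notes on version B (the rewrite author's own statement) =====
-- stated objective: alternative
-- what changed: Instead of a linear scan over the fixed bit-to-name dict testing each flag, B masks the input to the known flag bits and decodes it by divide-and-conquer: recursively split the bit range in halves (low half via mask, high half via shift), pruning any sub-range whose sub-mask is zero.
import Mathlib
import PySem

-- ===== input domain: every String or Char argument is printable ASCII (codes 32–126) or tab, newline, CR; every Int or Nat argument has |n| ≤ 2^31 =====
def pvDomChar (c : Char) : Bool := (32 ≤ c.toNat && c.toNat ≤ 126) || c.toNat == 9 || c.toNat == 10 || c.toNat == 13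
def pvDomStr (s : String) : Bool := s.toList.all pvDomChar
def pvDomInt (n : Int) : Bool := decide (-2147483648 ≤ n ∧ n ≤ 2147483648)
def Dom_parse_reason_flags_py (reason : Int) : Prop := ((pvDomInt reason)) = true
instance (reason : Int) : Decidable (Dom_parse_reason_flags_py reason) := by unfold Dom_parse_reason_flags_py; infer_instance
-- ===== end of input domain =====

-- B masks the input to the known flag bits and decodes them by divide-and-conquer
-- over the bit range (pruning zero sub-masks), instead of a linear scan of the
-- bit→name dict (objective: alternative).

-- ===== PORT A =====
-- the reason_map dict literal (distinct keys); .items() iterates it in this insertion order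
def usnReasonMap : List (Int × String) :=
  [(1, "DATA_OVERWRITE"), (2, "DATA_EXTEND"), (4, "DATA_TRUNCATION"), (8, "DATA_WRITE"),
   (16, "FILE_CREATE"), (32, "FILE_DELETE"), (64, "EA_CHANGE"), (128, "SECURITY_CHANGE"),
   (256, "RENAME_OLD_NAME"), (512, "RENAME_NEW_NAME"), (1024, "INDEXABLE_CHANGE"),
   (2048, "BASIC_INFO_CHANGE"), (4096, "HARD_LINK_CHANGE"), (8192, "COMPRESSION_CHANGE"),
   (16384, "ENCRYPTION_CHANGE"), (32768, "OBJECT_ID_CHANGE"), (65536, "REPARSE_POINT_CHANGE"),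
   (131072, "STREAM_CHANGE"), (262144, "CLOSE")]

-- `if reason & flag:` = the int is nonzero (Python truthiness)
def parse_reason_flags_py (reason : Int) : List String :=
  usnReasonMap.foldl
    (fun reasons fn => if PySem.Int.band reason fn.1 ≠ 0 then reasons ++ [fn.2] else reasons) []

-- ===== PORT B =====
def usnReasonNames : List String :=
  ["DATA_OVERWRITE", "DATA_EXTEND", "DATA_TRUNCATION", "DATA_WRITE", "FILE_CREATE",
   "FILE_DELETE", "EA_CHANGE", "SECURITY_CHANGE", "RENAME_OLD_NAME", "RENAME_NEW_NAME",
   "INDEXABLE_CHANGE", "BASIC_INFO_CHANGE", "HARD_LINK_CHANGE", "COMPRESSION_CHANGE",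
   "ENCRYPTION_CHANGE", "OBJECT_ID_CHANGE", "REPARSE_POINT_CHANGE", "STREAM_CHANGE", "CLOSE"]

-- Source B's inner `go`: m = reason & 0x7FFFF is nonnegative and < 2^width, so Nat is exact;
-- `m & ((1 << half) - 1)` = m % 2^half and `m >> half` = m / 2^half on Nat (exact);
-- _USN_REASON_NAMES[lo] always has lo < 19 when reached, so getD is exact
def pvAltGo (m lo width : Nat) : List String :=
  if m = 0 then []
  else if width ≤ 1 then [usnReasonNames.getD lo ""]
  else
    pvAltGo (m % 2 ^ (width / 2)) lo (width / 2) ++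
    pvAltGo (m / 2 ^ (width / 2)) (lo + width / 2) (width - width / 2)
termination_by width
decreasing_by all_goals omega

def parse_reason_flags_py_alt (reason : Int) : List String :=
  pvAltGo (PySem.Int.band reason 524287).toNat 0 19

-- ===== PRECONDITION & SPEC =====
def Spec_parse_reason_flags_py (reason : Int) (out : List String) : Prop := out = parse_reason_flags_py_alt reason
instance (reason : Int) (out : List String) : Decidable (Spec_parse_reason_flags_py reason out) := by unfold Spec_parse_reason_flags_py; infer_instance

-- ===== CLAIM (what is proved, stated in full; the proofs are below) =====
def Claim_equal_parse_reason_flags_py : Prop := ∀ (reason : Int), Dom_parse_reason_flags_py reason → Spec_parse_reason_flags_py reason (parse_reason_flags_py reason)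

-- ===== LEMMAS AND PROOFS =====

-- canonical middle form: read k bits of m starting at name index i, low bit first
def pvCollect (m i : Nat) : Nat → List String
  | 0 => []
  | k + 1 => (if m % 2 = 1 then [usnReasonNames.getD i ""] else []) ++ pvCollect (m / 2) (i + 1) k

theorem pvCollect_zero (k i : Nat) : pvCollect 0 i k = [] := by
  induction k generalizing i with
  | zero => rfl
  | succ k ih => simp [pvCollect, ih]

-- splitting the bit range: low a bits, then the rest
theorem pvCollect_split (a : Nat) : ∀ (b m i : Nat),
    pvCollect m i (a + b) = pvCollect (m % 2 ^ a) i a ++ pvCollect (m / 2 ^ a) (i + a) b := by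
  induction a with
  | zero => intro b m i; simp [pvCollect]
  | succ a ih =>
    intro b m i
    have h1 : a + 1 + b = (a + b) + 1 := by omega
    have hpow : m % 2 ^ (a + 1) = m % 2 + 2 * (m / 2 % 2 ^ a) := by
      rw [pow_succ, mul_comm, Nat.mod_mul]
    have hm2 : m % 2 ^ (a + 1) % 2 = m % 2 := by omega
    have hd2 : m % 2 ^ (a + 1) / 2 = m / 2 % 2 ^ a := by omega
    have hswap : m / 2 / 2 ^ a = m / 2 ^ (a + 1) := by
      rw [Nat.div_div_eq_div_mul, pow_succ, mul_comm]
    have hi : i + 1 + a = i + (a + 1) := by omega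
    rw [h1]
    simp only [pvCollect, hm2, hd2]
    rw [ih b (m / 2) (i + 1), hswap, hi, List.append_assoc]

-- Source B's divide-and-conquer equals the linear bit read, for in-range masks
theorem pvAltGo_eq_collect : ∀ (width m lo : Nat), m < 2 ^ width →
    pvAltGo m lo width = pvCollect m lo width := by
  intro width
  induction width using Nat.strong_induction_on with
  | _ width ih =>
    intro m lo h
    by_cases hm : m = 0
    · subst hm; rw [pvAltGo]; simp [pvCollect_zero]
    · by_cases hw : width ≤ 1
      · have hw1 : width = 1 := by
          interval_cases width
          · simp at h; omega
          · rfl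
        subst hw1
        have hm1 : m = 1 := by omega
        subst hm1
        rw [pvAltGo]
        simp [pvCollect]
      · rw [pvAltGo]
        have hh : width / 2 < width := by omega
        have hh2 : width - width / 2 < width := by omega
        have hlow : m % 2 ^ (width / 2) < 2 ^ (width / 2) := Nat.mod_lt _ (by positivity)
        have hhigh : m / 2 ^ (width / 2) < 2 ^ (width - width / 2) := by
          apply Nat.div_lt_of_lt_mul
          calc m < 2 ^ width := h
            _ = 2 ^ (width / 2) * 2 ^ (width - width / 2) := by
                rw [← pow_add]; congr 1; omega
        rw [ih _ hh _ lo hlow, ih _ hh2 _ _ hhigh]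
        simp only [hm, hw, if_false]
        have : width = width / 2 + (width - width / 2) := by omega
        conv_rhs => rw [this, pvCollect_split]

-- Python's `a & 0x7FFFF` is `a mod 2^19` (both signs)
theorem band_mask (a : Int) : PySem.Int.band a 524287 = a % 524288 := by
  unfold PySem.Int.band
  split_ifs with h1 _ _
  · have e : (524287 : Int).toNat = 2 ^ 19 - 1 := by decide
    rw [e, Nat.and_two_pow_sub_one_eq_mod]
    omega
  · omega
  · have e : (524287 : Int).toNat = 2 ^ 19 - 1 := by decide
    rw [e, Nat.and_comm, Nat.and_two_pow_sub_one_eq_mod]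
    omega
  · omega

-- a Nat land with a power of two is nonzero exactly when that bit is set
theorem land_two_pow_ne (x s : Nat) : (x &&& 2 ^ s ≠ 0) ↔ x.testBit s = true := by
  rw [Nat.and_two_pow]
  cases hb : x.testBit s <;> simp

-- the bit test `a & 2^s` of any int agrees with bit s of the masked nonnegative residue
theorem band_bit (a : Int) (s : Nat) (hs : s < 19) :
    (PySem.Int.band a (2 ^ s) ≠ 0) ↔ ((a % 524288).toNat).testBit s = true := by
  have hpow : ((2 : Int) ^ s).toNat = 2 ^ s := by
    rw [show ((2:Int) ^ s) = ((2 ^ s : Nat) : Int) by push_cast; ring, Int.toNat_natCast]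
  have hpos : (0 : Int) ≤ 2 ^ s := by positivity
  unfold PySem.Int.band
  split_ifs with h1
  · -- a ≥ 0
    have e : (a % 524288).toNat = a.toNat % 2 ^ 19 := by omega
    rw [hpow, e, Nat.testBit_mod_two_pow]
    simp [hs, land_two_pow_ne]
  · -- a < 0: band = 2^s - (2^s &&& c) with c the complement bits
    rw [hpow]
    have hc : ((-a - 1).toNat % 2 ^ 19) < 2 ^ 19 := Nat.mod_lt _ (by norm_num)
    have e : (a % 524288).toNat = 2 ^ 19 - ((-a - 1).toNat % 2 ^ 19 + 1) := by omega
    have hband : 2 ^ s &&& (-a - 1).toNat = ((-a - 1).toNat.testBit s).toNat * 2 ^ s := by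
      rw [Nat.and_comm, Nat.and_two_pow]
    rw [hband, e, Nat.testBit_two_pow_sub_succ hc, Nat.testBit_mod_two_pow]
    have h2s : (0:Nat) < 2 ^ s := by positivity
    cases hb : (-a - 1).toNat.testBit s <;> simp [hs]

-- unrolling A's fold over any consecutive run of flags equals reading bits of the residue
theorem foldA (a : Int) : ∀ (k s : Nat) (acc : List String), s + k ≤ 19 →
    List.foldl
      (fun reasons fn => if PySem.Int.band a fn.1 ≠ 0 then reasons ++ [fn.2] else reasons) acc
      ((List.range' s k).map (fun j => ((2 ^ j : Int), usnReasonNames.getD j "")))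
    = acc ++ pvCollect ((a % 524288).toNat / 2 ^ s) s k := by
  intro k
  induction k with
  | zero => intro s acc _; simp [pvCollect]
  | succ k ih =>
    intro s acc h
    rw [List.range'_succ, List.map_cons, List.foldl_cons]
    have hcond : (PySem.Int.band a (2 ^ s) ≠ 0) ↔ ((a % 524288).toNat / 2 ^ s) % 2 = 1 := by
      rw [band_bit a s (by omega), Nat.testBit_eq_decide_div_mod_eq]
      simp
    have hdiv : (a % 524288).toNat / 2 ^ s / 2 = (a % 524288).toNat / 2 ^ (s + 1) := by
      rw [Nat.div_div_eq_div_mul, pow_succ]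
    conv_rhs => rw [pvCollect]
    rw [hdiv, ih (s + 1) _ (by omega)]
    by_cases hb : PySem.Int.band a (2 ^ s) ≠ 0
    · have h1 := hcond.mp hb
      simp [hb, h1]
    · have h1 : ¬((a % 524288).toNat / 2 ^ s % 2 = 1) := fun hc => hb (hcond.mpr hc)
      simp [hb, h1]

theorem map_eq_range :
    usnReasonMap = (List.range' 0 19).map (fun j => ((2 ^ j : Int), usnReasonNames.getD j "")) := by
  decide

-- ===== VERDICT (by name: the statement is the Claim_ definition above) =====
theorem parse_reason_flags_py_spec : Claim_equal_parse_reason_flags_py := by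
  intro reason _dom
  unfold Spec_parse_reason_flags_py parse_reason_flags_py parse_reason_flags_py_alt
  rw [map_eq_range, foldA reason 19 0 [] (by omega), band_mask,
      pvAltGo_eq_collect 19 (reason % 524288).toNat 0 (by omega)]
  norm_num
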